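-- pv_equiv track=rewrite | github.com/MrBrantCode/unitest_baseline | mut_generate/mist_train_taco/taco_2183/solution.py | mail_management
-- ===== SOURCE A (Python) =====
-- def mail_management(N, Q, query):
--     unread = [i + 1 for i in range(N)]
--     read = []
--     trash = []
--
--     for i in range(0, 2 * Q, 2):
--         action = query[i]
--         message_id = query[i + 1]
--
--         if action == 1:
--             unread.remove(message_id)
--             read.append(message_id)
--         elif action == 2:
--             read.remove(message_id)
--             trash.append(message_id)
--         elif action == 3:
--             unread.remove(message_id)
--             trash.append(message_id)
--         elif action == 4:
--             trash.remove(message_id)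
--             read.append(message_id)
--
--     return unread, read, trash
-- ===== SOURCE B (Python) =====
-- def mail_management(N, Q, query):
--     # One pass: remember each message's LAST effective action; a dict re-inserted
--     # on every effective action keeps the messages in last-action order.
--     last = {}
--     for i in range(0, 2 * Q, 2):
--         action = query[i]
--         m = query[i + 1]
--         if action in (1, 2, 3, 4):
--             last.pop(m, None)
--             last[m] = action
--     unread = [m for m in range(1, N + 1) if m not in last]
--     read = [m for m, a in last.items() if a in (1, 4)]
--     trash = [m for m, a in last.items() if a in (2, 3)]
--     return unread, read, trash
-- ===== Notes on version B (the rewrite author's own statement) =====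
-- stated objective: alternative
-- what changed: A simulates all three mailboxes as lists with a linear .remove per query; B makes one pass recording only each message's last effective action in a dict (re-inserted to keep last-action order) and then builds the three lists with three comprehensions.
import Mathlib
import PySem

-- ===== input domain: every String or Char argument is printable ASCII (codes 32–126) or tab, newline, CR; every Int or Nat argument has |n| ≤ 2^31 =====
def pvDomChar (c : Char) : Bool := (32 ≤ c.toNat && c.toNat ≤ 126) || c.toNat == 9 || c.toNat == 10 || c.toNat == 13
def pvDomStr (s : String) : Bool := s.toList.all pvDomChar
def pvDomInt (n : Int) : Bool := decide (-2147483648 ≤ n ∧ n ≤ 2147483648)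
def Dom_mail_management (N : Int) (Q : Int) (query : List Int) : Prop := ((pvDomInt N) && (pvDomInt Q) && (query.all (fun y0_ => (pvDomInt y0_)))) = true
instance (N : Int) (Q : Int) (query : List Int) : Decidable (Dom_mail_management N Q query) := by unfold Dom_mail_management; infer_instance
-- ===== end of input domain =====

-- B replaces A's three-list simulation (a linear .remove per step) by one pass that keeps
-- only each message's last effective action in a dict, then builds the three lists once.

-- ===== PORT A =====
-- one loop step of A: read query[i], query[i+1], move the id between the three lists;
-- none = the Python raised (IndexError on query[...] or ValueError inside .remove)
def pvStepA (query : List Int) (st : Option (List Int × List Int × List Int)) (i : Int) :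
    Option (List Int × List Int × List Int) :=
  match st with
  | none => none
  | some (unread, read, trash) =>
    match PySem.List.pyGet? query i, PySem.List.pyGet? query (i + 1) with
    | some action, some m =>
      if action = 1 then (PySem.List.remove? unread m).map (fun u => (u, read ++ [m], trash))
      else if action = 2 then (PySem.List.remove? read m).map (fun r => (unread, r, trash ++ [m]))
      else if action = 3 then (PySem.List.remove? unread m).map (fun u => (u, read, trash ++ [m]))
      else if action = 4 then (PySem.List.remove? trash m).map (fun t => (unread, read ++ [m], t))
      else some (unread, read, trash)
    | _, _ => none

def mail_management (N : Int) (Q : Int) (query : List Int) : List Int × List Int × List Int :=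
  (((PySem.List.pyRange 0 (2 * Q) 2).foldl (pvStepA query)
      (some ((PySem.List.pyRange 0 N 1).map (· + 1), ([] : List Int), ([] : List Int)))).getD
    ([], [], []))

-- ===== PORT B =====
def pvEff (a : Int) : Bool := a == 1 || a == 2 || a == 3 || a == 4

-- one loop step of B: 'last.pop(m, None); last[m] = action' = erase then insert (re-insertion
-- moves the key to the end, so dict order = order of last effective action)
def pvStepB (query : List Int) (st : Option (PySem.Dict Int Int)) (i : Int) :
    Option (PySem.Dict Int Int) :=
  match st with
  | none => none
  | some last =>
    match PySem.List.pyGet? query i, PySem.List.pyGet? query (i + 1) with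
    | some action, some m =>
      some (if pvEff action then (last.erase m).insert m action else last)
    | _, _ => none

def mail_management_alt (N : Int) (Q : Int) (query : List Int) : List Int × List Int × List Int :=
  match (PySem.List.pyRange 0 (2 * Q) 2).foldl (pvStepB query) (some PySem.Dict.empty) with
  | none => ([], [], [])
  | some last =>
    ((PySem.List.pyRange 1 (N + 1) 1).filter (fun m => !last.contains m),
     (last.items.filter (fun p => p.2 == 1 || p.2 == 4)).map (·.1),
     (last.items.filter (fun p => p.2 == 2 || p.2 == 3)).map (·.1))

-- ===== PRECONDITION & SPEC =====
-- the (action, id) pairs the loop reads: (query[2k], query[2k+1]) for k = 0 .. Q-1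
def pvPairs (Q : Int) (query : List Int) : List (Int × Int) :=
  (List.range Q.toNat).map (fun k => (query.getD (2 * k) 0, query.getD (2 * k + 1) 0))

-- the last action in 1..4 performed on message m in the given step prefix (none = m untouched)
def pvLastAct (pre : List (Int × Int)) (m : Int) : Option Int :=
  ((pre.filter (fun p => p.2 == m && (p.1 == 1 || p.1 == 2 || p.1 == 3 || p.1 == 4))).map (·.1)).getLast?

-- a step (a, m) is legal iff m currently sits in the bucket the action removes from:
-- 1/3 need m unread (never touched, 1 ≤ m ≤ N), 2 needs m read (last action 1/4), 4 needs m trashed (last action 2/3)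
def pvStepOK (N : Int) (prev : Option Int) (a m : Int) : Bool :=
  (!(a == 1 || a == 3) || (prev == none && decide (1 ≤ m) && decide (m ≤ N))) &&
  (!(a == 2) || (prev == some 1 || prev == some 4)) &&
  (!(a == 4) || (prev == some 2 || prev == some 3))

-- Pre_ = exactly the inputs where A returns: query long enough for Q steps (else IndexError)
-- and every step legal (else .remove raises ValueError)
def Pre_mail_management (N : Int) (Q : Int) (query : List Int) : Prop :=
  2 * Q ≤ (query.length : Int) ∧
  ∀ k : Nat, (h : k < (pvPairs Q query).length) →
    pvStepOK N (pvLastAct ((pvPairs Q query).take k) ((pvPairs Q query)[k].2))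
      ((pvPairs Q query)[k].1) ((pvPairs Q query)[k].2) = true

instance (N : Int) (Q : Int) (query : List Int) : Decidable (Pre_mail_management N Q query) := by
  unfold Pre_mail_management; infer_instance

def pvWitness_mail_management : Int × Int × List Int := (2, 1, [1, 1])

def Spec_mail_management (N : Int) (Q : Int) (query : List Int) (out : List Int × List Int × List Int) : Prop := out = mail_management_alt N Q query
instance (N : Int) (Q : Int) (query : List Int) (out : List Int × List Int × List Int) : Decidable (Spec_mail_management N Q query out) := by unfold Spec_mail_management; infer_instance

-- ===== CLAIM (what is proved, stated in full; the proofs are below) =====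
def Claim_equal_mail_management : Prop := ∀ (N : Int) (Q : Int) (query : List Int), Dom_mail_management N Q query → Pre_mail_management N Q query → Spec_mail_management N Q query (mail_management N Q query)

-- ===== LEMMAS AND PROOFS =====

-- the dict port B's loop builds, as a fold over the extracted (action, id) pairs
def pvDictOf (P : List (Int × Int)) : PySem.Dict Int Int :=
  P.foldl (fun d p => if pvEff p.1 then (d.erase p.2).insert p.2 p.1 else d) PySem.Dict.empty

-- A's loop step on an extracted pair
def pvStepA' (st : Option (List Int × List Int × List Int)) (p : Int × Int) :
    Option (List Int × List Int × List Int) :=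
  match st with
  | none => none
  | some (unread, read, trash) =>
    if p.1 = 1 then (PySem.List.remove? unread p.2).map (fun u => (u, read ++ [p.2], trash))
    else if p.1 = 2 then (PySem.List.remove? read p.2).map (fun r => (unread, r, trash ++ [p.2]))
    else if p.1 = 3 then (PySem.List.remove? unread p.2).map (fun u => (u, read, trash ++ [p.2]))
    else if p.1 = 4 then (PySem.List.remove? trash p.2).map (fun t => (unread, read ++ [p.2], t))
    else some (unread, read, trash)

def pvValid (N : Int) (P : List (Int × Int)) : Prop :=
  ∀ k : Nat, (h : k < P.length) → pvStepOK N (pvLastAct (P.take k) (P[k].2)) (P[k].1) (P[k].2) = true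

-- Dict.erase facts (the PySem book has none for erase)
theorem pvItems_erase (d : PySem.Dict Int Int) (m : Int) :
    (d.erase m).items = d.items.filter (fun p => !(p.1 == m)) := rfl

theorem pvGet?_erase (d : PySem.Dict Int Int) (m x : Int) :
    (d.erase m).get? x = if x = m then none else d.get? x := by
  obtain ⟨items⟩ := d
  induction items with
  | nil => simp only [PySem.Dict.erase, PySem.Dict.get?, List.filter_nil, List.find?_nil,
      Option.map_none]; split <;> rfl
  | cons p rest ih =>
    simp only [PySem.Dict.erase, PySem.Dict.get?, List.filter_cons] at *
    by_cases hpm : p.1 = m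
    · by_cases hxm : x = m
      · simp_all
      · have hmx : ((m : Int) == x) = false := by simp; omega
        simp_all
    · by_cases hpx : p.1 = x
      · by_cases hxm : x = m <;> simp_all [List.find?_cons]
      · simp_all

theorem pvContains_erase (d : PySem.Dict Int Int) (m x : Int) :
    (d.erase m).contains x = if x = m then false else d.contains x := by
  rw [PySem.Dict.contains_eq_isSome_get?, pvGet?_erase, PySem.Dict.contains_eq_isSome_get?]
  split <;> rfl

theorem pvNodup_keys_erase (d : PySem.Dict Int Int) (m : Int) (h : d.keys.Nodup) :
    (d.erase m).keys.Nodup := by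
  have hsub : (d.erase m).keys.Sublist d.keys := by
    simp only [PySem.Dict.keys, pvItems_erase]
    exact List.Sublist.map _ List.filter_sublist
  exact h.sublist hsub

theorem pvDictOf_append (P : List (Int × Int)) (p : Int × Int) :
    pvDictOf (P ++ [p]) =
      (if pvEff p.1 then ((pvDictOf P).erase p.2).insert p.2 p.1 else pvDictOf P) := by
  simp [pvDictOf, List.foldl_append]

theorem pvEffExpr (b : Int) : (b == 1 || b == 2 || b == 3 || b == 4) = pvEff b := rfl

-- dict lookup = last effective action
theorem pvGet?_dictOf (P : List (Int × Int)) (x : Int) :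
    (pvDictOf P).get? x = pvLastAct P x := by
  induction P using List.reverseRecOn with
  | nil => simp [pvDictOf, pvLastAct, PySem.Dict.get?_empty]
  | append_singleton P p ih =>
    obtain ⟨a, m⟩ := p
    rw [pvDictOf_append]
    unfold pvLastAct
    rw [List.filter_append, List.map_append, List.getLast?_append]
    by_cases heff : pvEff a = true
    · simp only [heff, if_true]
      rw [PySem.Dict.get?_insert, pvGet?_erase]
      by_cases hxm : x = m
      · subst hxm
        simp only [List.filter_cons, List.filter_nil, pvEffExpr, heff, beq_self_eq_true,
          Bool.true_and, if_true, List.map_cons, List.map_nil]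
        rfl
      · have hmx : ((m : Int) == x) = false := by
          simp only [beq_eq_false_iff_ne, ne_eq]
          omega
        simp only [List.filter_cons, List.filter_nil, hmx, Bool.false_and, Bool.false_eq_true,
          if_false, List.map_nil, List.getLast?_nil, Option.none_or, if_neg hxm]
        rw [ih]
        rfl
    · have heff' : pvEff a = false := by simpa using heff
      simp only [heff', if_false, Bool.false_eq_true, List.filter_cons, List.filter_nil,
        pvEffExpr, Bool.and_false, List.map_nil, List.getLast?_nil, Option.none_or]
      rw [ih]
      rfl

theorem pvNodup_keys_dictOf (P : List (Int × Int)) : (pvDictOf P).keys.Nodup := by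
  induction P using List.reverseRecOn with
  | nil => exact PySem.Dict.nodup_keys_empty
  | append_singleton P p ih =>
    rw [pvDictOf_append]
    split
    · exact PySem.Dict.nodup_keys_insert _ _ _ (pvNodup_keys_erase _ _ ih)
    · exact ih

-- range / indexing normalisation
theorem pvRange2 (Q : Int) :
    PySem.List.pyRange 0 (2 * Q) 2 = (List.range Q.toNat).map (fun (k : Nat) => (2 * (k : Int))) := by
  rw [PySem.List.pyRange_of_pos _ _ (by norm_num)]
  have h : (if (0:Int) < 2 * Q then ((2 * Q - 0 + 2 - 1) / 2).toNat else 0) = Q.toNat := by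
    split <;> omega
  rw [h]
  simp only [zero_add]

theorem pvGetPair (query : List Int) (n : Nat) (h : n < query.length) :
    PySem.List.pyGet? query ((n : Nat) : Int) = some (query.getD n 0) := by
  rw [PySem.List.pyGet?_natCast, List.getElem?_eq_getElem h, List.getD_eq_getElem _ _ h]

theorem pvFoldA_eq (Q : Int) (query : List Int) (h : 2 * Q ≤ (query.length : Int)) (st0 : Option (List Int × List Int × List Int)) :
    (PySem.List.pyRange 0 (2 * Q) 2).foldl (pvStepA query) st0
      = (pvPairs Q query).foldl pvStepA' st0 := by
  rw [pvRange2, List.foldl_map]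
  unfold pvPairs
  rw [List.foldl_map]
  apply PySem.List.foldl_congr_mem
  intro acc k hk
  have hk' : k < Q.toNat := List.mem_range.mp hk
  have h1 : 2 * k < query.length := by omega
  have h2 : 2 * k + 1 < query.length := by omega
  have e1 : (2 * (k : Int)) = ((2 * k : Nat) : Int) := by push_cast; ring
  have e2 : (2 * (k : Int) + 1) = ((2 * k + 1 : Nat) : Int) := by push_cast; ring
  match acc with
  | none => rfl
  | some (u, r, t) =>
    show pvStepA query (some (u, r, t)) (2 * (k : Int)) = _
    unfold pvStepA
    rw [e2, e1, pvGetPair query _ h1, pvGetPair query _ h2]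
    rfl

theorem pvFoldB_eq (Q : Int) (query : List Int) (h : 2 * Q ≤ (query.length : Int)) :
    (PySem.List.pyRange 0 (2 * Q) 2).foldl (pvStepB query) (some PySem.Dict.empty)
      = some (pvDictOf (pvPairs Q query)) := by
  rw [pvRange2, List.foldl_map]
  unfold pvDictOf pvPairs
  rw [List.foldl_map]
  have key : ∀ (l : List Nat), (∀ k ∈ l, 2 * k + 1 < query.length) → ∀ d : PySem.Dict Int Int,
      l.foldl (fun st (k : Nat) => pvStepB query st (2 * (k : Int))) (some d)
        = some (l.foldl (fun d k =>
            if pvEff (query.getD (2 * k) 0) then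
              (d.erase (query.getD (2 * k + 1) 0)).insert (query.getD (2 * k + 1) 0) (query.getD (2 * k) 0)
            else d) d) := by
    intro l
    induction l with
    | nil => intro _ d; rfl
    | cons k rest ih =>
      intro hl d
      have h2 : 2 * k + 1 < query.length := hl k (by simp)
      have h1 : 2 * k < query.length := by omega
      have e1 : (2 * (k : Int)) = ((2 * k : Nat) : Int) := by push_cast; ring
      have e2 : (2 * (k : Int) + 1) = ((2 * k + 1 : Nat) : Int) := by push_cast; ring
      have hstep : pvStepB query (some d) (2 * (k : Int))
          = some (if pvEff (query.getD (2 * k) 0) then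
              ((d.erase (query.getD (2 * k + 1) 0)).insert (query.getD (2 * k + 1) 0) (query.getD (2 * k) 0))
            else d) := by
        unfold pvStepB
        rw [e2, e1, pvGetPair query _ h1, pvGetPair query _ h2]
      simp only [List.foldl_cons, hstep]
      exact ih (fun k hk => hl k (by simp [hk])) _
  exact key (List.range Q.toNat) (fun k hk => by
    have := List.mem_range.mp hk; omega) PySem.Dict.empty

theorem pvInitUnread (N : Int) :
    (PySem.List.pyRange 0 N 1).map (· + 1) = PySem.List.pyRange 1 (N + 1) 1 := by
  rw [PySem.List.pyRange_one 0 N, PySem.List.pyRange_one 1 (N + 1), List.map_map]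
  rw [show ((N : Int) + 1 - 1) = N - 0 from by ring]
  apply List.map_congr_left
  intro k _
  simp only [Function.comp]
  ring

-- validity of a prefix / of the last step
theorem pvValid_prefix (N : Int) (P : List (Int × Int)) (p : Int × Int)
    (hv : pvValid N (P ++ [p])) : pvValid N P := by
  intro k h
  have h' : k < (P ++ [p]).length := by simp; omega
  have hvk := hv k h'
  rwa [List.take_append_of_le_length (by omega), List.getElem_append_left h] at hvk

theorem pvValid_last (N : Int) (P : List (Int × Int)) (a m : Int)
    (hv : pvValid N (P ++ [(a, m)])) : pvStepOK N (pvLastAct P m) a m = true := by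
  have h' : P.length < (P ++ [(a, m)]).length := by simp
  have hvk := hv P.length h'
  have e1 : (P ++ [(a, m)]).take P.length = P := by simp
  have e2 : (P ++ [(a, m)])[P.length] = (a, m) := by simp
  rw [e1, e2] at hvk
  exact hvk

-- erase-then-insert at dict level
theorem pvItems_insert_generic (d : PySem.Dict Int Int) (m a : Int) :
    ((d.erase m).insert m a).items = d.items.filter (fun p => !(p.1 == m)) ++ [(m, a)] := by
  rw [PySem.Dict.items_insert_of_not_contains _ _ (by rw [pvContains_erase]; simp), pvItems_erase]

theorem pvItems_insert_fresh (d : PySem.Dict Int Int) (m a : Int)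
    (hc : d.contains m = false) :
    ((d.erase m).insert m a).items = d.items ++ [(m, a)] := by
  rw [pvItems_insert_generic]
  congr 1
  apply List.filter_eq_self.mpr
  intro p hp
  have : ∀ q ∈ d.items, ¬(q.1 == m) = true := by
    simpa [PySem.Dict.contains, List.any_eq_false] using hc
  simpa using this p hp

-- unread: inserting a fresh key removes exactly that id from the filtered range
theorem pvUnreadStep (d : PySem.Dict Int Int) (N m a : Int)
    (hc : d.contains m = false) (hm1 : 1 ≤ m) (hmN : m ≤ N) :
    PySem.List.remove? ((PySem.List.pyRange 1 (N + 1) 1).filter (fun x => !d.contains x)) m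
      = some ((PySem.List.pyRange 1 (N + 1) 1).filter
          (fun x => !((d.erase m).insert m a).contains x)) := by
  have hmem : m ∈ (PySem.List.pyRange 1 (N + 1) 1).filter (fun x => !d.contains x) := by
    rw [List.mem_filter]
    exact ⟨PySem.List.mem_pyRange_one.mpr ⟨hm1, by omega⟩, by simp [hc]⟩
  rw [PySem.List.remove?_eq_some_erase _ _ hmem]
  congr 1
  rw [List.Nodup.erase_eq_filter ((PySem.List.nodup_pyRange_one 1 (N + 1)).filter _) m,
    List.filter_filter]
  apply List.filter_congr
  intro x _
  rw [PySem.Dict.contains_insert, pvContains_erase]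
  by_cases hxm : x = m
  · subst hxm; simp
  · simp [hxm, bne]

-- unread: re-filing an id already out of unread does not change the unread list
theorem pvUnreadSame (d : PySem.Dict Int Int) (m a : Int) (hc : d.contains m = true)
    (l : List Int) :
    l.filter (fun x => !((d.erase m).insert m a).contains x)
      = l.filter (fun x => !d.contains x) := by
  apply List.filter_congr
  intro x _
  rw [PySem.Dict.contains_insert, pvContains_erase]
  by_cases hxm : x = m
  · subst hxm; simp [hc]
  · simp [hxm]

-- removing an id from a bucket list = filtering its (unique) dict entry out
theorem pvBucketRemove (d : PySem.Dict Int Int) (m v : Int) (pred : Int → Bool)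
    (hnd : d.keys.Nodup) (hget : d.get? m = some v) (hpv : pred v = true) :
    PySem.List.remove? ((d.items.filter (fun p => pred p.2)).map (·.1)) m
      = some ((d.items.filter (fun p => pred p.2 && !(p.1 == m))).map (·.1)) := by
  have hmem : m ∈ (d.items.filter (fun p => pred p.2)).map (·.1) :=
    List.mem_map.mpr ⟨(m, v), List.mem_filter.mpr
      ⟨PySem.Dict.mem_items_of_get?_eq_some d hget, hpv⟩, rfl⟩
  rw [PySem.List.remove?_eq_some_erase _ _ hmem]
  congr 1
  have hnl : ((d.items.filter (fun p => pred p.2)).map (·.1)).Nodup :=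
    hnd.sublist (List.Sublist.map _ List.filter_sublist)
  rw [hnl.erase_eq_filter, List.filter_map, List.filter_filter]
  congr 1
  apply List.filter_congr
  intro p _
  by_cases hpm : p.1 = m <;> simp [hpm, Function.comp, Bool.and_comm, bne]

-- the unique entry at key m does not satisfy the other bucket's predicate
theorem pvOtherBucket (d : PySem.Dict Int Int) (m v : Int) (pred : Int → Bool)
    (hnd : d.keys.Nodup) (hget : d.get? m = some v) (hpv : pred v = false) :
    d.items.filter (fun p => pred p.2 && !(p.1 == m)) = d.items.filter (fun p => pred p.2) := by
  apply List.filter_congr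
  intro p hp
  by_cases hpm : p.1 = m
  · have : d.get? m = some p.2 := by
      rw [← hpm]; exact PySem.Dict.get?_of_mem_items d (by simpa using hp) hnd
    rw [hget] at this
    have hv2 : p.2 = v := by injection this.symm
    simp [hv2, hpv]
  · simp [hpm]

-- step-evaluation of A's pure step
theorem pvStepA'_1 (u r t : List Int) (m : Int) :
    pvStepA' (some (u, r, t)) (1, m)
      = (PySem.List.remove? u m).map (fun u' => (u', r ++ [m], t)) := by
  unfold pvStepA'; norm_num

theorem pvStepA'_2 (u r t : List Int) (m : Int) :
    pvStepA' (some (u, r, t)) (2, m)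
      = (PySem.List.remove? r m).map (fun r' => (u, r', t ++ [m])) := by
  unfold pvStepA'; norm_num

theorem pvStepA'_3 (u r t : List Int) (m : Int) :
    pvStepA' (some (u, r, t)) (3, m)
      = (PySem.List.remove? u m).map (fun u' => (u', r, t ++ [m])) := by
  unfold pvStepA'; norm_num

theorem pvStepA'_4 (u r t : List Int) (m : Int) :
    pvStepA' (some (u, r, t)) (4, m)
      = (PySem.List.remove? t m).map (fun t' => (u, r ++ [m], t')) := by
  unfold pvStepA'; norm_num

theorem pvStepA'_other (u r t : List Int) (a m : Int)
    (h1 : a ≠ 1) (h2 : a ≠ 2) (h3 : a ≠ 3) (h4 : a ≠ 4) :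
    pvStepA' (some (u, r, t)) (a, m) = some (u, r, t) := by
  unfold pvStepA'; simp [h1, h2, h3, h4]

theorem pvDictOf_append' (P : List (Int × Int)) (a m : Int) :
    pvDictOf (P ++ [(a, m)]) =
      (if pvEff a then ((pvDictOf P).erase m).insert m a else pvDictOf P) := by
  rw [pvDictOf_append]

-- the main loop invariant: A's three lists, reconstructed from B's last-action dict
theorem pvInvariant (N : Int) (P : List (Int × Int)) (hv : pvValid N P) :
    P.foldl pvStepA' (some ((PySem.List.pyRange 1 (N + 1) 1), ([] : List Int), ([] : List Int)))
      = some ((PySem.List.pyRange 1 (N + 1) 1).filter (fun m => !(pvDictOf P).contains m),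
              ((pvDictOf P).items.filter (fun p => p.2 == 1 || p.2 == 4)).map (·.1),
              ((pvDictOf P).items.filter (fun p => p.2 == 2 || p.2 == 3)).map (·.1)) := by
  induction P using List.reverseRecOn with
  | nil =>
    simp [pvDictOf, PySem.Dict.empty]
  | append_singleton P p ih =>
    obtain ⟨a, m⟩ := p
    have hvP : pvValid N P := pvValid_prefix N P _ hv
    have hOK := pvValid_last N P a m hv
    rw [List.foldl_append, ih hvP, List.foldl_cons, List.foldl_nil]
    by_cases ha1 : a = 1
    · subst ha1
      simp [pvStepOK] at hOK
      obtain ⟨⟨hnone, hm1⟩, hmN⟩ := hOK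
      have hget : (pvDictOf P).get? m = none := by rw [pvGet?_dictOf]; exact hnone
      have hc : (pvDictOf P).contains m = false :=
        (PySem.Dict.get?_eq_none_iff_contains _ m).mp hget
      rw [pvStepA'_1, pvUnreadStep (pvDictOf P) N m 1 hc hm1 hmN, Option.map_some,
        pvDictOf_append']
      simp only [show pvEff (1 : Int) = true from rfl, if_true]
      rw [pvItems_insert_fresh _ _ _ hc]
      simp [List.filter_append]
    · by_cases ha2 : a = 2
      · subst ha2
        simp [pvStepOK] at hOK
        have hget : ∃ v, (pvDictOf P).get? m = some v ∧ (v == 1 || v == 4) = true := by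
          rcases hOK with h | h
          · exact ⟨1, by rw [pvGet?_dictOf]; exact h, rfl⟩
          · exact ⟨4, by rw [pvGet?_dictOf]; exact h, rfl⟩
        obtain ⟨v, hget, hpv⟩ := hget
        have hnd := pvNodup_keys_dictOf P
        have hc : (pvDictOf P).contains m = true := by
          rw [PySem.Dict.contains_eq_isSome_get?, hget]; rfl
        have htp : ((fun x => x == 2 || x == 3) v) = false := by
          simp at hpv ⊢; omega
        rw [pvStepA'_2,
          pvBucketRemove (pvDictOf P) m v (fun x => x == 1 || x == 4) hnd hget hpv,
          Option.map_some, pvDictOf_append']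
        simp only [show pvEff (2 : Int) = true from rfl, if_true]
        rw [pvItems_insert_generic, pvUnreadSame _ _ _ hc]
        have e3 : ((pvDictOf P).items.filter (fun (p : Int × Int) => !(p.1 == m))
              ++ [((m : Int), (2 : Int))]).filter (fun (p : Int × Int) => p.2 == 2 || p.2 == 3)
            = (pvDictOf P).items.filter (fun (p : Int × Int) => (p.2 == 2 || p.2 == 3) && !(p.1 == m))
              ++ [(m, 2)] := by
          rw [List.filter_append, List.filter_filter]; simp
        rw [e3]
        rw [pvOtherBucket (pvDictOf P) m v (fun x => x == 2 || x == 3) hnd hget htp]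
        simp [List.filter_append, List.filter_filter]
      · by_cases ha3 : a = 3
        · subst ha3
          simp [pvStepOK] at hOK
          obtain ⟨⟨hnone, hm1⟩, hmN⟩ := hOK
          have hget : (pvDictOf P).get? m = none := by rw [pvGet?_dictOf]; exact hnone
          have hc : (pvDictOf P).contains m = false :=
            (PySem.Dict.get?_eq_none_iff_contains _ m).mp hget
          rw [pvStepA'_3, pvUnreadStep (pvDictOf P) N m 3 hc hm1 hmN, Option.map_some,
            pvDictOf_append']
          simp only [show pvEff (3 : Int) = true from rfl, if_true]
          rw [pvItems_insert_fresh _ _ _ hc]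
          simp [List.filter_append]
        · by_cases ha4 : a = 4
          · subst ha4
            simp [pvStepOK] at hOK
            have hget : ∃ v, (pvDictOf P).get? m = some v ∧ (v == 2 || v == 3) = true := by
              rcases hOK with h | h
              · exact ⟨2, by rw [pvGet?_dictOf]; exact h, rfl⟩
              · exact ⟨3, by rw [pvGet?_dictOf]; exact h, rfl⟩
            obtain ⟨v, hget, hpv⟩ := hget
            have hnd := pvNodup_keys_dictOf P
            have hc : (pvDictOf P).contains m = true := by
              rw [PySem.Dict.contains_eq_isSome_get?, hget]; rfl
            have hrp : ((fun x => x == 1 || x == 4) v) = false := by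
              simp at hpv ⊢; omega
            rw [pvStepA'_4,
              pvBucketRemove (pvDictOf P) m v (fun x => x == 2 || x == 3) hnd hget hpv,
              Option.map_some, pvDictOf_append']
            simp only [show pvEff (4 : Int) = true from rfl, if_true]
            rw [pvItems_insert_generic, pvUnreadSame _ _ _ hc]
            have e3 : ((pvDictOf P).items.filter (fun (p : Int × Int) => !(p.1 == m))
                  ++ [((m : Int), (4 : Int))]).filter (fun (p : Int × Int) => p.2 == 1 || p.2 == 4)
                = (pvDictOf P).items.filter (fun (p : Int × Int) => (p.2 == 1 || p.2 == 4) && !(p.1 == m))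
                  ++ [(m, 4)] := by
              rw [List.filter_append, List.filter_filter]; simp
            rw [e3]
            rw [pvOtherBucket (pvDictOf P) m v (fun x => x == 1 || x == 4) hnd hget hrp]
            simp [List.filter_append, List.filter_filter]
          · rw [pvStepA'_other _ _ _ _ _ ha1 ha2 ha3 ha4, pvDictOf_append']
            have heff : pvEff a = false := by simp [pvEff, ha1, ha2, ha3, ha4]
            rw [heff]
            simp

-- ===== VERDICT (by name: the statement is the Claim_ definition above) =====
theorem mail_management_spec : Claim_equal_mail_management := by
  intro N Q query _hdom hpre
  obtain ⟨hlen, hvalid⟩ := hpre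
  show mail_management N Q query = mail_management_alt N Q query
  unfold mail_management mail_management_alt
  rw [pvFoldA_eq Q query hlen, pvFoldB_eq Q query hlen, pvInitUnread,
    pvInvariant N (pvPairs Q query) hvalid]
  rfl
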